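-- pv_equiv track=rewrite | github.com/rntk/rsstag | rsstag/snippets.py | _normalize_sentence_numbers
-- ===== SOURCE A (Python) =====
-- from typing import Any, Dict, List, Optional
--
-- def _normalize_sentence_numbers(
--     values: List[int], available_numbers: set[int]
-- ) -> List[int]:
--     """Return unique sentence numbers preserving numeric order."""
--     normalized_values: set[int] = set()
--     for value in values:
--         try:
--             normalized_value: int = int(value)
--         except (TypeError, ValueError):
--             continue
--         if normalized_value in available_numbers:
--             normalized_values.add(normalized_value)
--
--     return sorted(normalized_values)
-- ===== SOURCE B (Python) =====
-- def _normalize_sentence_numbers(values, available_numbers):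
--     """Return unique sentence numbers preserving numeric order."""
--     seen = set(values)
--     return [number for number in sorted(available_numbers) if number in seen]
-- ===== Notes on version B (the rewrite author's own statement) =====
-- stated objective: alternative
-- what changed: Instead of looping over values, testing membership in available_numbers and sorting an accumulated result set, B sorts available_numbers once and filters it against a set built from values, so the output is produced already in order with no result-set accumulation and no final dedup.
import Mathlib
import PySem

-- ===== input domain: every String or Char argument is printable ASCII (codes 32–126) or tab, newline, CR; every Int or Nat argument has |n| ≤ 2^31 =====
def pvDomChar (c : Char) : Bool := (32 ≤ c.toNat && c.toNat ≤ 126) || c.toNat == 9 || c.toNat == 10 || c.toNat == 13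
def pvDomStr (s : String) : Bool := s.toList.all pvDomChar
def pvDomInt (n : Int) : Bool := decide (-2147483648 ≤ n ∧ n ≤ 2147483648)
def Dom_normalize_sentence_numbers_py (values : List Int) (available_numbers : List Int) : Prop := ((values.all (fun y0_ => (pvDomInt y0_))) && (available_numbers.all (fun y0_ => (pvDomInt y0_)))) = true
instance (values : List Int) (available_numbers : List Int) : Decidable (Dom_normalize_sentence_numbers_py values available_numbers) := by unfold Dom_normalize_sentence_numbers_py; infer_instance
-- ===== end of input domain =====

-- B sorts available_numbers once and filters it against set(values), producing the output in order;
-- alternative decomposition (no result-set accumulation, no final dedup). Equal return values proved on Pre_.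

-- ===== PORT A =====
-- A: loop over values; int(value) on an int is the value itself (never raises on Int inputs);
-- add to the accumulating set when it is a member of available_numbers; return sorted(set).
def normalize_sentence_numbers_py (values : List Int) (available_numbers : List Int) : List Int :=
  let normalized_values : PySem.Set Int :=
    values.foldl (fun s value =>
      let normalized_value : Int := value
      if PySem.Set.contains available_numbers normalized_value then PySem.Set.add s normalized_value
      else s) PySem.Set.empty
  PySem.List.sorted normalized_values (fun x => x) false

-- ===== PORT B =====
-- B: seen = set(values); [n for n in sorted(available_numbers) if n in seen]
def normalize_sentence_numbers_py_alt (values : List Int) (available_numbers : List Int) : List Int :=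
  let seen : PySem.Set Int := PySem.Set.ofList values
  (PySem.List.sorted available_numbers (fun x => x) false).filter
    (fun number => PySem.Set.contains seen number)

-- ===== PRECONDITION & SPEC =====
-- Pre_ only states the set[int] type invariant of the Python parameter available_numbers:
-- as a Python set its elements are distinct, so its List Int encoding has no duplicates.
def Pre_normalize_sentence_numbers_py (values : List Int) (available_numbers : List Int) : Prop :=
  available_numbers.Nodup
instance (values : List Int) (available_numbers : List Int) : Decidable (Pre_normalize_sentence_numbers_py values available_numbers) := by unfold Pre_normalize_sentence_numbers_py; infer_instance
def pvWitness_normalize_sentence_numbers_py : List Int × List Int := ([3, 1, 3, 7], [1, 2, 3])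

def Spec_normalize_sentence_numbers_py (values : List Int) (available_numbers : List Int) (out : List Int) : Prop := out = normalize_sentence_numbers_py_alt values available_numbers
instance (values : List Int) (available_numbers : List Int) (out : List Int) : Decidable (Spec_normalize_sentence_numbers_py values available_numbers out) := by unfold Spec_normalize_sentence_numbers_py; infer_instance

-- ===== CLAIM =====
def Claim_equal_normalize_sentence_numbers_py : Prop := ∀ (values : List Int) (available_numbers : List Int), Dom_normalize_sentence_numbers_py values available_numbers → Pre_normalize_sentence_numbers_py values available_numbers → Spec_normalize_sentence_numbers_py values available_numbers (normalize_sentence_numbers_py values available_numbers)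

-- ===== LEMMAS AND PROOFS =====
lemma pvA_mem_foldl (avail : List Int) (values : List Int) (s : PySem.Set Int) (y : Int) :
    (y ∈ values.foldl (fun s value =>
        if PySem.Set.contains avail value then PySem.Set.add s value else s) s) ↔
      y ∈ s ∨ (y ∈ values ∧ y ∈ avail) := by
  induction values generalizing s with
  | nil => simp
  | cons v vs ih =>
    simp only [List.foldl_cons, ih, List.mem_cons]
    split_ifs with h
    · rw [PySem.Set.mem_add]
      constructor
      · rintro (⟨hs | he⟩ | hm)
        · exact Or.inl hs
        · subst he; exact Or.inr ⟨Or.inl rfl, (PySem.Set.contains_iff _ _).1 h⟩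
        · exact Or.inr ⟨Or.inr hm.1, hm.2⟩
      · rintro (hs | ⟨hv | hvs, ha⟩)
        · exact Or.inl (Or.inl hs)
        · exact Or.inl (Or.inr hv)
        · exact Or.inr ⟨hvs, ha⟩
    · constructor
      · rintro (hs | hm)
        · exact Or.inl hs
        · exact Or.inr ⟨Or.inr hm.1, hm.2⟩
      · rintro (hs | ⟨hv | hvs, ha⟩)
        · exact Or.inl hs
        · exact absurd ((PySem.Set.contains_iff _ _).2 (hv ▸ ha)) (by simpa using h)
        · exact Or.inr ⟨hvs, ha⟩

lemma pvA_nodup_foldl (avail : List Int) (values : List Int) (s : PySem.Set Int)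
    (hs : s.Nodup) :
    (values.foldl (fun s value =>
        if PySem.Set.contains avail value then PySem.Set.add s value else s) s).Nodup := by
  induction values generalizing s with
  | nil => simpa
  | cons v vs ih =>
    simp only [List.foldl_cons]
    split_ifs with h
    · exact ih _ (PySem.Set.nodup_add s v hs)
    · exact ih _ hs

-- ===== VERDICT =====
theorem normalize_sentence_numbers_py_spec : Claim_equal_normalize_sentence_numbers_py := by
  intro values available_numbers _ hnd
  unfold Spec_normalize_sentence_numbers_py normalize_sentence_numbers_py
    normalize_sentence_numbers_py_alt
  simp only []
  -- name B's result list and show it is a strictly increasing rearrangement of A's set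
  apply PySem.List.sorted_eq_of_perm_of_pairwise_lt
  · -- permutation: same members, both nodup
    apply (List.perm_ext_iff_of_nodup _ _).2
    · intro y
      rw [List.mem_filter, PySem.List.mem_sorted, pvA_mem_foldl]
      simp [PySem.Set.mem_ofList, and_comm]
    · exact List.Nodup.filter _ ((PySem.List.sorted_perm _ _ _).nodup_iff.2 hnd)
    · exact pvA_nodup_foldl _ _ _ List.nodup_nil
  · -- strictly increasing: sorted gives ≤-pairwise, nodup gives ≠-pairwise
    apply List.Pairwise.filter
    have h1 := PySem.List.sorted_pairwise available_numbers (fun x => x) (κ := Int)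
    have h2 : (PySem.List.sorted available_numbers (fun x => x) false).Nodup :=
      (PySem.List.sorted_perm _ _ _).nodup_iff.2 hnd
    exact (h1.and h2).imp (fun h => lt_of_le_of_ne h.1 h.2)
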